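-- pv_equiv track=rewrite | github.com/ogghst/test_puntini | backend/puntini/nodes/evaluate.py | _is_todo_completed_by_tool
-- ===== SOURCE A (Python) =====
-- from typing import Any, Dict, Optional, Literal, TYPE_CHECKING
--
-- def _is_todo_completed_by_tool(todo_description: str, tool_name: str, result: Dict[str, Any]) -> bool:
--     """Check if a todo item was completed by the given tool execution.
--
--     Args:
--         todo_description: Description of the todo item.
--         tool_name: Name of the tool that was executed.
--         result: Result from the tool execution.
--
--     Returns:
--         True if the todo was likely completed by this tool execution.
--     """
--     # Simple heuristic matching based on tool name and todo description
--     todo_lower = todo_description.lower()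
--
--     if tool_name == "add_node":
--         return any(keyword in todo_lower for keyword in ["create", "add", "node", "entity"])
--     elif tool_name == "add_edge":
--         return any(keyword in todo_lower for keyword in ["connect", "link", "relationship", "edge", "between"])
--     elif tool_name == "update_props":
--         return any(keyword in todo_lower for keyword in ["update", "modify", "change", "property", "attribute"])
--     elif tool_name == "delete_node":
--         return any(keyword in todo_lower for keyword in ["delete", "remove", "node", "entity"])
--     elif tool_name == "delete_edge":
--         return any(keyword in todo_lower for keyword in ["delete", "remove", "relationship", "edge"])
--     elif tool_name in ["query_graph", "cypher_query"]:
--         return any(keyword in todo_lower for keyword in ["query", "search", "find", "get", "retrieve"])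
--
--     return False
-- ===== SOURCE B (Python) =====
-- # Inverted index: one flat scan over (keyword -> tools that it completes) entries,
-- # instead of A's dispatch-to-a-keyword-list ladder.
-- _KEYWORD_TOOLS = [
--     ("create", ["add_node"]),
--     ("add", ["add_node"]),
--     ("node", ["add_node", "delete_node"]),
--     ("entity", ["add_node", "delete_node"]),
--     ("connect", ["add_edge"]),
--     ("link", ["add_edge"]),
--     ("relationship", ["add_edge", "delete_edge"]),
--     ("edge", ["add_edge", "delete_edge"]),
--     ("between", ["add_edge"]),
--     ("update", ["update_props"]),
--     ("modify", ["update_props"]),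
--     ("change", ["update_props"]),
--     ("property", ["update_props"]),
--     ("attribute", ["update_props"]),
--     ("delete", ["delete_node", "delete_edge"]),
--     ("remove", ["delete_node", "delete_edge"]),
--     ("query", ["query_graph", "cypher_query"]),
--     ("search", ["query_graph", "cypher_query"]),
--     ("find", ["query_graph", "cypher_query"]),
--     ("get", ["query_graph", "cypher_query"]),
--     ("retrieve", ["query_graph", "cypher_query"]),
-- ]
--
-- def _is_todo_completed_by_tool(todo_description: str, tool_name: str, result) -> bool:
--     todo_lower = todo_description.lower()
--     return any(tool_name in tools and keyword in todo_lower
--                for keyword, tools in _KEYWORD_TOOLS)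
-- ===== Notes on version B (the rewrite author's own statement) =====
-- stated objective: alternative
-- what changed: Replaces A's per-tool if/elif dispatch to a keyword list with an inverted index (keyword -> tools it completes) scanned in a single flat pass, testing each distinct keyword once against the tool name and the lowered description.
import Mathlib
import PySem

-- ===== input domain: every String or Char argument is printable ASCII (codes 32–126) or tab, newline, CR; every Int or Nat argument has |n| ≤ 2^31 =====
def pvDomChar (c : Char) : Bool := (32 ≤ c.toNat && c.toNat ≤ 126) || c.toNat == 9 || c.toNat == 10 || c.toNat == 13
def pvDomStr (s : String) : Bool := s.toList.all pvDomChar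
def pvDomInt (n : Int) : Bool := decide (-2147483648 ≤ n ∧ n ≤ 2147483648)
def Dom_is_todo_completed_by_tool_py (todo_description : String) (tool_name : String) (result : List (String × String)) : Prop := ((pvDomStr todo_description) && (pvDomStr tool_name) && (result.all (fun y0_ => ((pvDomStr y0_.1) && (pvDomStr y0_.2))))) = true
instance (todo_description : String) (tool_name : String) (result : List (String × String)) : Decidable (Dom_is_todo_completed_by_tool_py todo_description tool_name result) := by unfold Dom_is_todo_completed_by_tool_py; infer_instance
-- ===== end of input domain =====

-- B replaces A's per-tool if/elif dispatch with an inverted keyword→tools index scanned in one flat pass; alternative structure, same cost.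

-- ===== PORT A =====
def is_todo_completed_by_tool_py (todo_description : String) (tool_name : String) (_result : List (String × String)) : Bool :=
  let todo_lower := PySem.Str.lower todo_description
  if tool_name == "add_node" then
    ["create", "add", "node", "entity"].any (fun k => PySem.Str.isIn k todo_lower)
  else if tool_name == "add_edge" then
    ["connect", "link", "relationship", "edge", "between"].any (fun k => PySem.Str.isIn k todo_lower)
  else if tool_name == "update_props" then
    ["update", "modify", "change", "property", "attribute"].any (fun k => PySem.Str.isIn k todo_lower)
  else if tool_name == "delete_node" then
    ["delete", "remove", "node", "entity"].any (fun k => PySem.Str.isIn k todo_lower)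
  else if tool_name == "delete_edge" then
    ["delete", "remove", "relationship", "edge"].any (fun k => PySem.Str.isIn k todo_lower)
  else if tool_name == "query_graph" || tool_name == "cypher_query" then
    ["query", "search", "find", "get", "retrieve"].any (fun k => PySem.Str.isIn k todo_lower)
  else
    false

-- ===== PORT B =====
-- module-level inverted index _KEYWORD_TOOLS of Source B
def keywordTools : List (String × List String) :=
  [ ("create", ["add_node"]),
    ("add", ["add_node"]),
    ("node", ["add_node", "delete_node"]),
    ("entity", ["add_node", "delete_node"]),
    ("connect", ["add_edge"]),
    ("link", ["add_edge"]),
    ("relationship", ["add_edge", "delete_edge"]),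
    ("edge", ["add_edge", "delete_edge"]),
    ("between", ["add_edge"]),
    ("update", ["update_props"]),
    ("modify", ["update_props"]),
    ("change", ["update_props"]),
    ("property", ["update_props"]),
    ("attribute", ["update_props"]),
    ("delete", ["delete_node", "delete_edge"]),
    ("remove", ["delete_node", "delete_edge"]),
    ("query", ["query_graph", "cypher_query"]),
    ("search", ["query_graph", "cypher_query"]),
    ("find", ["query_graph", "cypher_query"]),
    ("get", ["query_graph", "cypher_query"]),
    ("retrieve", ["query_graph", "cypher_query"]) ]

def is_todo_completed_by_tool_py_alt (todo_description : String) (tool_name : String) (_result : List (String × String)) : Bool :=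
  let todo_lower := PySem.Str.lower todo_description
  keywordTools.any (fun kt => kt.2.contains tool_name && PySem.Str.isIn kt.1 todo_lower)

-- ===== PRECONDITION & SPEC =====
def Spec_is_todo_completed_by_tool_py (todo_description : String) (tool_name : String) (result : List (String × String)) (out : Bool) : Prop := out = is_todo_completed_by_tool_py_alt todo_description tool_name result
instance (todo_description : String) (tool_name : String) (result : List (String × String)) (out : Bool) : Decidable (Spec_is_todo_completed_by_tool_py todo_description tool_name result out) := by unfold Spec_is_todo_completed_by_tool_py; infer_instance

-- ===== CLAIM (what is proved, stated in full; the proofs are below) =====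
def Claim_equal_is_todo_completed_by_tool_py : Prop := ∀ (todo_description : String) (tool_name : String) (result : List (String × String)), Dom_is_todo_completed_by_tool_py todo_description tool_name result → Spec_is_todo_completed_by_tool_py todo_description tool_name result (is_todo_completed_by_tool_py todo_description tool_name result)

-- ===== LEMMAS AND PROOFS =====

-- For each tool name, the flat scan of the inverted index collects exactly that
-- tool's keywords (stated for an arbitrary keyword predicate p).
theorem scan_add_node (p : String → Bool) :
    keywordTools.any (fun kt => kt.2.contains "add_node" && p kt.1)
      = ["create", "add", "node", "entity"].any p := by
  simp only [keywordTools, List.any_cons, List.any_nil, List.contains_cons, List.contains_nil]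
  norm_num
  try simp
  try ac_rfl

theorem scan_add_edge (p : String → Bool) :
    keywordTools.any (fun kt => kt.2.contains "add_edge" && p kt.1)
      = ["connect", "link", "relationship", "edge", "between"].any p := by
  simp only [keywordTools, List.any_cons, List.any_nil, List.contains_cons, List.contains_nil]
  norm_num
  try simp
  try ac_rfl

theorem scan_update_props (p : String → Bool) :
    keywordTools.any (fun kt => kt.2.contains "update_props" && p kt.1)
      = ["update", "modify", "change", "property", "attribute"].any p := by
  simp only [keywordTools, List.any_cons, List.any_nil, List.contains_cons, List.contains_nil]
  norm_num
  try simp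
  try ac_rfl

theorem scan_delete_node (p : String → Bool) :
    keywordTools.any (fun kt => kt.2.contains "delete_node" && p kt.1)
      = ["delete", "remove", "node", "entity"].any p := by
  simp only [keywordTools, List.any_cons, List.any_nil, List.contains_cons, List.contains_nil]
  norm_num
  try simp
  try ac_rfl

theorem scan_delete_edge (p : String → Bool) :
    keywordTools.any (fun kt => kt.2.contains "delete_edge" && p kt.1)
      = ["delete", "remove", "relationship", "edge"].any p := by
  simp only [keywordTools, List.any_cons, List.any_nil, List.contains_cons, List.contains_nil]
  norm_num
  try simp
  try ac_rfl

theorem scan_query_graph (p : String → Bool) :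
    keywordTools.any (fun kt => kt.2.contains "query_graph" && p kt.1)
      = ["query", "search", "find", "get", "retrieve"].any p := by
  simp only [keywordTools, List.any_cons, List.any_nil, List.contains_cons, List.contains_nil]
  norm_num
  try simp
  try ac_rfl

theorem scan_cypher_query (p : String → Bool) :
    keywordTools.any (fun kt => kt.2.contains "cypher_query" && p kt.1)
      = ["query", "search", "find", "get", "retrieve"].any p := by
  simp only [keywordTools, List.any_cons, List.any_nil, List.contains_cons, List.contains_nil]
  norm_num
  try simp
  try ac_rfl

-- Unknown tool names occur in no entry, so the scan yields false.
theorem scan_unknown (p : String → Bool) (n : String)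
    (h1 : n ≠ "add_node") (h2 : n ≠ "add_edge") (h3 : n ≠ "update_props")
    (h4 : n ≠ "delete_node") (h5 : n ≠ "delete_edge")
    (h6 : n ≠ "query_graph") (h7 : n ≠ "cypher_query") :
    keywordTools.any (fun kt => kt.2.contains n && p kt.1) = false := by
  simp only [keywordTools, List.any_cons, List.any_nil, List.contains_cons, List.contains_nil]
  simp [h1, h2, h3, h4, h5, h6, h7]

-- ===== VERDICT (by name: the statement is the Claim_ definition above) =====
theorem is_todo_completed_by_tool_py_spec : Claim_equal_is_todo_completed_by_tool_py := by
  intro t n r _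
  unfold Spec_is_todo_completed_by_tool_py is_todo_completed_by_tool_py is_todo_completed_by_tool_py_alt
  simp only []
  by_cases h1 : n = "add_node"
  · subst h1
    rw [scan_add_node (fun k => PySem.Str.isIn k (PySem.Str.lower t))]
    simp
  by_cases h2 : n = "add_edge"
  · subst h2
    rw [scan_add_edge (fun k => PySem.Str.isIn k (PySem.Str.lower t))]
    simp
  by_cases h3 : n = "update_props"
  · subst h3
    rw [scan_update_props (fun k => PySem.Str.isIn k (PySem.Str.lower t))]
    simp
  by_cases h4 : n = "delete_node"
  · subst h4
    rw [scan_delete_node (fun k => PySem.Str.isIn k (PySem.Str.lower t))]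
    simp
  by_cases h5 : n = "delete_edge"
  · subst h5
    rw [scan_delete_edge (fun k => PySem.Str.isIn k (PySem.Str.lower t))]
    simp
  by_cases h6 : n = "query_graph"
  · subst h6
    rw [scan_query_graph (fun k => PySem.Str.isIn k (PySem.Str.lower t))]
    simp
  by_cases h7 : n = "cypher_query"
  · subst h7
    rw [scan_cypher_query (fun k => PySem.Str.isIn k (PySem.Str.lower t))]
    simp
  rw [scan_unknown (fun k => PySem.Str.isIn k (PySem.Str.lower t)) n h1 h2 h3 h4 h5 h6 h7]
  simp [h1, h2, h3, h4, h5, h6, h7]
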